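-- pv_equiv track=rewrite | github.com/ZheRao/ETLCodeBase | scripts/Traction_Processing.py | get_farm_usa
-- ===== SOURCE A (Python) =====
-- def get_farm_usa(entry, target="From"):
--     location = entry[target].lower()
--     havre_locations = ["bitz yard", "wilson east", "wilson west", "havre", "sally yard", "hadford", "toluca"]
--     if ("camp 4" in location) or ("fort smith" in location) or ("c4" in location) or ("c4." in location):
--         return "Camp 4"
--     elif ("camp 1" in location) or ("fly creek" in location) or ("fc " in location):
--         return "Fly Creek"
--     contained = False
--     for item in havre_locations:
--         if item in location:
--             contained = True
--             break
--     if contained: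
--         return "Havre"
--     else:
--         return "Invalid"
-- ===== SOURCE B (Python) =====
-- CATS = ["Camp 4", "Fly Creek", "Havre", "Invalid"]
-- KEYWORDS = [
--     ("camp 4", 0), ("fort smith", 0), ("c4", 0), ("c4.", 0),
--     ("camp 1", 1), ("fly creek", 1), ("fc ", 1),
--     ("bitz yard", 2), ("wilson east", 2), ("wilson west", 2),
--     ("havre", 2), ("sally yard", 2), ("hadford", 2), ("toluca", 2),
-- ]
--
-- def get_farm_usa(entry, target="From"):
--     location = entry[target].lower()
--     # single left-to-right scan of the string: at each offset, prefix-match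
--     # every keyword and keep the best (lowest) category priority seen
--     best = 3
--     for i in range(len(location)):
--         for kw, c in KEYWORDS:
--             if c < best and location[i:].startswith(kw):
--                 best = c
--     return CATS[best]
-- ===== Notes on version B (the rewrite author's own statement) =====
-- stated objective: alternative
-- what changed: Instead of A's short-circuiting if/elif chains of substring tests, B makes one left-to-right scan over the string's positions, prefix-matching every keyword at each offset and keeping the minimum category priority seen, then indexes a category table with that minimum.
import Mathlib
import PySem

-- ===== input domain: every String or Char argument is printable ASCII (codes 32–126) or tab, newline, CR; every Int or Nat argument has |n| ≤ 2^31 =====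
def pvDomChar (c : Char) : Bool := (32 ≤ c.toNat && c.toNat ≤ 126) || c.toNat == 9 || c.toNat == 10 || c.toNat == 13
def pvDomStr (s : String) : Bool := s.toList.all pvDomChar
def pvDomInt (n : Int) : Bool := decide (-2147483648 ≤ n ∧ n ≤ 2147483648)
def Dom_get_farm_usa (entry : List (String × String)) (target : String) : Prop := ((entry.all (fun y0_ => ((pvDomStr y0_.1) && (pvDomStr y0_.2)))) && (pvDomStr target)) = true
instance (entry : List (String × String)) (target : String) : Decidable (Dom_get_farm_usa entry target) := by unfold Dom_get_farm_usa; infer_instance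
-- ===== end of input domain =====

-- B replaces A's short-circuiting if/elif chains of substring tests by one positional
-- scan of the string that prefix-matches every keyword at each offset and keeps the
-- minimum category priority, then indexes a category table; equivalence on entries
-- containing the target key.

-- ===== PORT A =====
-- the 'for item in havre_locations: if item in location: contained = True; break' loop
def havreScan (items : List String) (location : String) : Bool :=
  match items with
  | [] => false
  | item :: rest => if PySem.Str.isIn item location then true else havreScan rest location

def get_farm_usa (entry : List (String × String)) (target : String) : String :=
  match (PySem.Dict.mk entry).get? target with
  | none => ""   -- KeyError in Python; excluded by Pre_get_farm_usa
  | some v =>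
    let location := PySem.Str.lower v
    if PySem.Str.isIn "camp 4" location || PySem.Str.isIn "fort smith" location
        || PySem.Str.isIn "c4" location || PySem.Str.isIn "c4." location then "Camp 4"
    else if PySem.Str.isIn "camp 1" location || PySem.Str.isIn "fly creek" location
        || PySem.Str.isIn "fc " location then "Fly Creek"
    else
      let contained := havreScan ["bitz yard", "wilson east", "wilson west", "havre",
                                  "sally yard", "hadford", "toluca"] location
      if contained then "Havre" else "Invalid"

-- ===== PORT B =====
def catNames : List String := ["Camp 4", "Fly Creek", "Havre", "Invalid"]

def kwTable : List (String × Nat) :=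
  [("camp 4", 0), ("fort smith", 0), ("c4", 0), ("c4.", 0),
   ("camp 1", 1), ("fly creek", 1), ("fc ", 1),
   ("bitz yard", 2), ("wilson east", 2), ("wilson west", 2),
   ("havre", 2), ("sally yard", 2), ("hadford", 2), ("toluca", 2)]

-- the body of the inner 'for kw, c in KEYWORDS' loop; location[i:] (i ≥ 0) is drop i
def kwStep (loc : List Char) (i : Nat) (b : Nat) (p : String × Nat) : Nat :=
  if p.2 < b ∧ PySem.Chars.startswith (loc.drop i) p.1.toList = true then p.2 else b

def innerScan (loc : List Char) (i : Nat) (b : Nat) : Nat :=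
  kwTable.foldl (kwStep loc i) b

def get_farm_usa_alt (entry : List (String × String)) (target : String) : String :=
  match (PySem.Dict.mk entry).get? target with
  | none => ""   -- KeyError in Python; excluded by Pre_get_farm_usa
  | some v =>
    let loc := (PySem.Str.lower v).toList
    let best := (List.range loc.length).foldl (fun b i => innerScan loc i b) 3
    (PySem.List.pyGet? catNames (best : Int)).getD ""   -- CATS[best]; best ≤ 3 always

-- ===== PRECONDITION & SPEC =====
-- Pre_ excludes exactly the entries lacking the target key, on which Python A raises KeyError.
def Pre_get_farm_usa (entry : List (String × String)) (target : String) : Prop :=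
  target ∈ entry.map Prod.fst
instance (entry : List (String × String)) (target : String) : Decidable (Pre_get_farm_usa entry target) := by unfold Pre_get_farm_usa; infer_instance

def pvWitness_get_farm_usa : (List (String × String)) × String := ([("From", "camp 4 north")], "From")

def Spec_get_farm_usa (entry : List (String × String)) (target : String) (out : String) : Prop := out = get_farm_usa_alt entry target
instance (entry : List (String × String)) (target : String) (out : String) : Decidable (Spec_get_farm_usa entry target out) := by unfold Spec_get_farm_usa; infer_instance

-- ===== CLAIM (what is proved, stated in full; the proofs are below) =====
def Claim_equal_get_farm_usa : Prop := ∀ (entry : List (String × String)) (target : String), Dom_get_farm_usa entry target → Pre_get_farm_usa entry target → Spec_get_farm_usa entry target (get_farm_usa entry target)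

-- ===== LEMMAS AND PROOFS =====

theorem foldl_kwStep_le (loc : List Char) (i : Nat) (K : List (String × Nat)) (b : Nat) :
    K.foldl (kwStep loc i) b ≤ b := by
  induction K generalizing b with
  | nil => simp
  | cons p K ih =>
    simp only [List.foldl_cons]
    unfold kwStep
    split_ifs with h
    · exact le_trans (ih _) (le_of_lt h.1)
    · exact ih b

theorem foldl_kwStep_mem (loc : List Char) (i : Nat) (K : List (String × Nat)) (b : Nat) :
    (∃ p ∈ K, PySem.Chars.startswith (loc.drop i) p.1.toList = true ∧
        K.foldl (kwStep loc i) b = p.2) ∨ K.foldl (kwStep loc i) b = b := by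
  induction K generalizing b with
  | nil => right; rfl
  | cons p K ih =>
    simp only [List.foldl_cons]
    rcases ih (kwStep loc i b p) with ⟨q, hq, hs, he⟩ | he
    · exact Or.inl ⟨q, List.mem_cons_of_mem _ hq, hs, he⟩
    · rw [he]
      unfold kwStep
      split_ifs with h
      · exact Or.inl ⟨p, List.mem_cons_self, h.2, rfl⟩
      · exact Or.inr rfl

theorem foldl_kwStep_min (loc : List Char) (i : Nat) (K : List (String × Nat)) (b : Nat)
    (p : String × Nat) (hp : p ∈ K)
    (hs : PySem.Chars.startswith (loc.drop i) p.1.toList = true) :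
    K.foldl (kwStep loc i) b ≤ p.2 := by
  induction K generalizing b with
  | nil => cases hp
  | cons q K ih =>
    simp only [List.foldl_cons]
    rcases List.mem_cons.mp hp with rfl | hp'
    · unfold kwStep
      split_ifs with h
      · exact foldl_kwStep_le loc i K p.2
      · have hb : b ≤ p.2 := by
          by_contra hc
          exact h ⟨Nat.lt_of_not_le hc, hs⟩
        exact le_trans (foldl_kwStep_le loc i K b) hb
    · exact ih _ hp'

theorem foldl_pos_le (loc : List Char) (ps : List Nat) (b : Nat) :
    ps.foldl (fun b i => innerScan loc i b) b ≤ b := by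
  induction ps generalizing b with
  | nil => simp
  | cons i ps ih =>
    simp only [List.foldl_cons]
    exact le_trans (ih _) (by simpa [innerScan] using foldl_kwStep_le loc i kwTable b)

theorem foldl_pos_mem (loc : List Char) (ps : List Nat) (b : Nat) :
    (∃ i ∈ ps, ∃ p ∈ kwTable, PySem.Chars.startswith (loc.drop i) p.1.toList = true ∧
        ps.foldl (fun b i => innerScan loc i b) b = p.2) ∨
      ps.foldl (fun b i => innerScan loc i b) b = b := by
  induction ps generalizing b with
  | nil => right; rfl
  | cons i ps ih =>
    simp only [List.foldl_cons]
    rcases ih (innerScan loc i b) with ⟨j, hj, q, hq, hs, he⟩ | he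
    · exact Or.inl ⟨j, List.mem_cons_of_mem _ hj, q, hq, hs, he⟩
    · rw [he]
      rcases foldl_kwStep_mem loc i kwTable b with ⟨q, hq, hs, he'⟩ | he'
      · exact Or.inl ⟨i, List.mem_cons_self, q, hq, hs, he'⟩
      · exact Or.inr he'

theorem foldl_pos_min (loc : List Char) (ps : List Nat) (b : Nat)
    (i : Nat) (hi : i ∈ ps) (p : String × Nat) (hp : p ∈ kwTable)
    (hs : PySem.Chars.startswith (loc.drop i) p.1.toList = true) :
    ps.foldl (fun b i => innerScan loc i b) b ≤ p.2 := by
  induction ps generalizing b with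
  | nil => cases hi
  | cons j ps ih =>
    simp only [List.foldl_cons]
    rcases List.mem_cons.mp hi with rfl | hi'
    · exact le_trans (foldl_pos_le loc ps _) (foldl_kwStep_min loc i kwTable b p hp hs)
    · exact ih _ hi'

-- an occurrence of a nonempty keyword gives a match position inside range(len(loc))
theorem isIn_to_pos (kw : String) (loc : List Char) (hk : kw.toList ≠ [])
    (h : PySem.Chars.isIn kw.toList loc = true) :
    ∃ i ∈ List.range loc.length, PySem.Chars.startswith (loc.drop i) kw.toList = true := by
  obtain ⟨j, hj⟩ := (PySem.Chars.exists_prefix_drop_iff_isIn _ _).mpr h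
  by_cases hlt : j < loc.length
  · exact ⟨j, List.mem_range.mpr hlt, (PySem.Chars.startswith_iff _ _).mpr hj⟩
  · exfalso
    have : loc.drop j = [] := List.drop_eq_nil_of_le (Nat.le_of_not_lt hlt)
    rw [this] at hj
    exact hk (List.prefix_nil.mp hj)

theorem pos_to_isIn (kw : String) (loc : List Char) (i : Nat)
    (hs : PySem.Chars.startswith (loc.drop i) kw.toList = true) :
    PySem.Chars.isIn kw.toList loc = true :=
  (PySem.Chars.exists_prefix_drop_iff_isIn _ _).mp ⟨i, (PySem.Chars.startswith_iff _ _).mp hs⟩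

theorem havreScan_eq_any (items : List String) (location : String) :
    havreScan items location = items.any (fun kw => PySem.Str.isIn kw location) := by
  induction items with
  | nil => rfl
  | cons h t ih => simp [havreScan, ih, List.any_cons, Bool.if_true_left]

-- Str.isIn on the lowered string equals Chars.isIn on its char list
theorem strIsIn_eq_chars (kw s : String) :
    PySem.Str.isIn kw s = PySem.Chars.isIn kw.toList s.toList := by
  simp [PySem.Str.isIn]

-- the central classification lemma: A's chain equals B's min-priority scan
set_option maxRecDepth 8000 in
set_option maxHeartbeats 1000000 in
theorem classify_eq (location : String) :
    (if PySem.Str.isIn "camp 4" location || PySem.Str.isIn "fort smith" location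
        || PySem.Str.isIn "c4" location || PySem.Str.isIn "c4." location then "Camp 4"
     else if PySem.Str.isIn "camp 1" location || PySem.Str.isIn "fly creek" location
        || PySem.Str.isIn "fc " location then "Fly Creek"
     else if havreScan ["bitz yard", "wilson east", "wilson west", "havre",
                        "sally yard", "hadford", "toluca"] location then "Havre" else "Invalid")
    = (PySem.List.pyGet? catNames
        (((List.range location.toList.length).foldl
            (fun b i => innerScan location.toList i b) 3 : Nat) : Int)).getD "" := by
  set loc := location.toList with hloc
  set best := (List.range loc.length).foldl (fun b i => innerScan loc i b) 3 with hbest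
  have hle : ∀ (kw : String) (c : Nat), (kw, c) ∈ kwTable →
      PySem.Chars.isIn kw.toList loc = true → kw.toList ≠ [] → best ≤ c := by
    intro kw c hmem hin hk
    obtain ⟨i, hi, hs⟩ := isIn_to_pos kw loc hk hin
    exact foldl_pos_min loc _ 3 i hi (kw, c) hmem hs
  have hcases : (∃ p ∈ kwTable, PySem.Chars.isIn p.1.toList loc = true ∧ best = p.2) ∨ best = 3 := by
    rcases foldl_pos_mem loc (List.range loc.length) 3 with ⟨i, _, p, hp, hs, he⟩ | he
    · exact Or.inl ⟨p, hp, pos_to_isIn p.1 loc i hs, he⟩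
    · exact Or.inr he
  by_cases h0 : (PySem.Str.isIn "camp 4" location || PySem.Str.isIn "fort smith" location
      || PySem.Str.isIn "c4" location || PySem.Str.isIn "c4." location) = true
  · rw [if_pos h0]
    have hb0 : best = 0 := by
      have : best ≤ 0 := by
        simp only [Bool.or_eq_true, strIsIn_eq_chars] at h0
        rcases h0 with ((h | h) | h) | h
        · exact hle "camp 4" 0 (by decide) h (by decide)
        · exact hle "fort smith" 0 (by decide) h (by decide)
        · exact hle "c4" 0 (by decide) h (by decide)
        · exact hle "c4." 0 (by decide) h (by decide)
      omega
    rw [hb0]; rfl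
  · rw [if_neg h0]
    simp only [Bool.or_eq_true, not_or, Bool.not_eq_true, strIsIn_eq_chars] at h0
    obtain ⟨⟨⟨n1, n2⟩, n3⟩, n4⟩ := h0
    have hne0 : best ≠ 0 := by
      intro hb
      rcases hcases with ⟨p, hp, hin, he⟩ | he
      · rw [hb] at he
        simp only [kwTable, List.mem_cons, List.not_mem_nil, or_false] at hp
        rcases hp with rfl|rfl|rfl|rfl|rfl|rfl|rfl|rfl|rfl|rfl|rfl|rfl|rfl|rfl <;>
          first
          | exact absurd he (by decide)
          | (rw [n1] at hin; exact Bool.noConfusion hin)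
          | (rw [n2] at hin; exact Bool.noConfusion hin)
          | (rw [n3] at hin; exact Bool.noConfusion hin)
          | (rw [n4] at hin; exact Bool.noConfusion hin)
      · omega
    by_cases h1 : (PySem.Str.isIn "camp 1" location || PySem.Str.isIn "fly creek" location
        || PySem.Str.isIn "fc " location) = true
    · rw [if_pos h1]
      have hb1 : best = 1 := by
        have : best ≤ 1 := by
          simp only [Bool.or_eq_true, strIsIn_eq_chars] at h1
          rcases h1 with (h | h) | h
          · exact hle "camp 1" 1 (by decide) h (by decide)
          · exact hle "fly creek" 1 (by decide) h (by decide)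
          · exact hle "fc " 1 (by decide) h (by decide)
        omega
      rw [hb1]; rfl
    · rw [if_neg h1]
      simp only [Bool.or_eq_true, not_or, Bool.not_eq_true, strIsIn_eq_chars] at h1
      obtain ⟨⟨m1, m2⟩, m3⟩ := h1
      have hne1 : best ≠ 1 := by
        intro hb
        rcases hcases with ⟨p, hp, hin, he⟩ | he
        · rw [hb] at he
          simp only [kwTable, List.mem_cons, List.not_mem_nil, or_false] at hp
          rcases hp with rfl|rfl|rfl|rfl|rfl|rfl|rfl|rfl|rfl|rfl|rfl|rfl|rfl|rfl <;>
          first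
          | exact absurd he (by decide)
          | (rw [m1] at hin; exact Bool.noConfusion hin)
          | (rw [m2] at hin; exact Bool.noConfusion hin)
          | (rw [m3] at hin; exact Bool.noConfusion hin)
        · omega
      rw [havreScan_eq_any]
      by_cases h2 : (["bitz yard", "wilson east", "wilson west", "havre",
            "sally yard", "hadford", "toluca"].any (fun kw => PySem.Str.isIn kw location)) = true
      · rw [if_pos h2]
        have hb2 : best = 2 := by
          have : best ≤ 2 := by
            simp only [List.any_cons, List.any_nil, Bool.or_eq_true, Bool.or_false,
              strIsIn_eq_chars] at h2
            rcases h2 with h|h|h|h|h|h|h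
            · exact hle "bitz yard" 2 (by decide) h (by decide)
            · exact hle "wilson east" 2 (by decide) h (by decide)
            · exact hle "wilson west" 2 (by decide) h (by decide)
            · exact hle "havre" 2 (by decide) h (by decide)
            · exact hle "sally yard" 2 (by decide) h (by decide)
            · exact hle "hadford" 2 (by decide) h (by decide)
            · exact hle "toluca" 2 (by decide) h (by decide)
          omega
        rw [hb2]; rfl
      · rw [if_neg h2]
        simp only [List.any_cons, List.any_nil, Bool.or_eq_true, Bool.or_false,
          not_or, Bool.not_eq_true, strIsIn_eq_chars] at h2
        obtain ⟨k1, k2, k3, k4, k5, k6, k7⟩ := h2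
        have hb3 : best = 3 := by
          rcases hcases with ⟨p, hp, hin, he⟩ | he
          · simp only [kwTable, List.mem_cons, List.not_mem_nil, or_false] at hp
            exfalso
            rcases hp with rfl|rfl|rfl|rfl|rfl|rfl|rfl|rfl|rfl|rfl|rfl|rfl|rfl|rfl <;>
              first
              | (rw [n1] at hin; exact Bool.noConfusion hin)
              | (rw [n2] at hin; exact Bool.noConfusion hin)
              | (rw [n3] at hin; exact Bool.noConfusion hin)
              | (rw [n4] at hin; exact Bool.noConfusion hin)
              | (rw [m1] at hin; exact Bool.noConfusion hin)
              | (rw [m2] at hin; exact Bool.noConfusion hin)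
              | (rw [m3] at hin; exact Bool.noConfusion hin)
              | (rw [k1] at hin; exact Bool.noConfusion hin)
              | (rw [k2] at hin; exact Bool.noConfusion hin)
              | (rw [k3] at hin; exact Bool.noConfusion hin)
              | (rw [k4] at hin; exact Bool.noConfusion hin)
              | (rw [k5] at hin; exact Bool.noConfusion hin)
              | (rw [k6] at hin; exact Bool.noConfusion hin)
              | (rw [k7] at hin; exact Bool.noConfusion hin)
          · exact he
        rw [hb3]; rfl

-- ===== VERDICT (by name: the statement is the Claim_ definition above) =====
theorem get_farm_usa_spec : Claim_equal_get_farm_usa := by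
  intro entry target _ _
  unfold Spec_get_farm_usa get_farm_usa get_farm_usa_alt
  cases (PySem.Dict.mk entry).get? target with
  | none => rfl
  | some v => exact classify_eq (PySem.Str.lower v)
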